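/- GENERATED by farm/mkstatement.py from design/units.tsv (unit `crc32_init`) and the Specs of Vorbis/Spec/*.lean — do not edit.
   THE STATEMENT of the proof unit `crc32_init`: the function `crc32_init` (30 instructions) satisfies its contract,
   given the contracts of its callees. What the names mean: Vorbis/Spec/Basic.lean. The theorem to prove:
   `theorem crc32_init_ok : Vorbis.Spec.crc32_init.Statement`. -/
import Vorbis.Spec.Alloc
namespace Vorbis.Spec.crc32_init
open X86 X86.User Asan

/-- The statement of unit `crc32_init`. -/
def Statement : Prop :=
  ∀ (Lay : Layout) (_hLay : Lay.hi = 0x1000000) (μ : Microarch) (_hμ : UserX.MicroOK μ) (u₀ : State)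
    (_hcode : HasCodeNat Lay u₀ Vorbis.L.crc32_init.entry Vorbis.Code.code_crc32_init.nat Vorbis.L.crc32_init.size)
    (_h_asan_store4_noabort : Asan.SmallCheck Lay μ Vorbis.WayInv (Vorbis.CodeOK u₀) [.rax, .rcx, .rdx] 4 Vorbis.L.__asan_store4_noabort.entry),
    ∀ (others : List Obj) (frames : List (Nat × FrameLayout)), Calls Lay μ Vorbis.WayInv (Vorbis.conv u₀) Vorbis.L.crc32_init.entry (Vorbis.Spec.crc32_init.spec others frames)

end Vorbis.Spec.crc32_init
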